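-- pv_equiv track=rewrite | github.com/leodan52/Objeto_NumeroRacional | main.py | SubStr_repetida3
-- ===== SOURCE A (Python) =====
-- def SubStr_repetida3(cadena):
-- 	largo = len(cadena)
-- 	maximo = largo//2 + 1
-- 	len_patron = 1
-- 	Mas_repite = 1
-- 	salida = "Nada"
--
-- 	subcadenas = dict()
--
-- 	for m in range(1,largo):
-- 		substr = cadena[-m:]
-- 		subcadenas[substr] = 0
--
-- 		if m >= maximo+1:
-- 			break
--
-- 		for n in range(m, largo, m):
-- 			check = cadena[-n:]
-- 			factor = n//m
-- 			if substr*factor == check: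
-- 				subcadenas[substr] += 1
-- 			else:
-- 				break
--
-- 	for sub in subcadenas:
-- 		if subcadenas[sub] > Mas_repite:
-- 			Mas_repite = subcadenas[sub]
-- 			salida = sub
--
-- 	return salida, Mas_repite
-- ===== SOURCE B (Python) =====
-- def SubStr_repetida3(cadena):
--     largo = len(cadena)
--     maximo = largo // 2 + 1
--     salida, mas = "Nada", 1
--     tope = min(largo - 1, maximo)
--     for m in range(1, tope + 1):
--         sub = cadena[largo - m:]
--         k = 1
--         for j in range(2, (largo - 1) // m + 1):
--             if cadena[largo - j*m: largo - (j-1)*m] != sub: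
--                 break
--             k = j
--         if k > mas:
--             mas, salida = k, sub
--     return salida, mas
-- ===== Notes on version B (the rewrite author's own statement) =====
-- stated objective: faster
-- what changed: B verifies each period incrementally by comparing only the next m-character block against the suffix (keeping a running best), instead of A's rebuilding substr*factor and comparing the whole repeated string at every multiple and collecting counts in a dict scanned afterwards.
import Mathlib
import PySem

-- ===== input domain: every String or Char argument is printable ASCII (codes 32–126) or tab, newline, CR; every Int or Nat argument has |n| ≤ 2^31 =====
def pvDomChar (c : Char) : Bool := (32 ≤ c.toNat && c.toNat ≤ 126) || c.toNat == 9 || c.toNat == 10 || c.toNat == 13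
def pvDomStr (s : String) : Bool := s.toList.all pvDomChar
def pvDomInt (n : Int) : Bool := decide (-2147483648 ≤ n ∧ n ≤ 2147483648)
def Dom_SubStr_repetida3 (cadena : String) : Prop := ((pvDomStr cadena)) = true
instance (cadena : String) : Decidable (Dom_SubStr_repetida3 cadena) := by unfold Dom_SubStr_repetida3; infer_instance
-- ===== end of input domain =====

-- B re-implements A's repeated-suffix search by comparing, per period length m, only the next
-- m-character block against the suffix instead of rebuilding and comparing the whole repeated
-- string at every multiple (and keeps a running best instead of a dict scanned afterwards).

-- ===== PORT A =====
-- All Python loop counters (m, n) and lengths here are nonnegative ints; they are ported over Nat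
-- (exact: largo//2 is Nat division, range(1,largo) = List.range' 1 (largo-1) 1, and
--  range(m,largo,m) = List.range' m ((largo-1)/m) m for 1 ≤ m, since (largo-1)/m is its element count).

-- cadena[-m:]  (m ≥ 1 in every use)
def pvASuffix (l : List Char) (m : Nat) : List Char :=
  PySem.List.slice l (some (-(m : Int))) none

-- inner 'for n in range(m, largo, m)' with break; 'subcadenas[substr] += 1' is a get-then-set
def pvAInner (l substr : List Char) (m : Nat) :
    List Nat → PySem.Dict (List Char) Int → PySem.Dict (List Char) Int
  | [], d => d
  | n :: rest, d =>
    let check := pvASuffix l n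
    let factor := n / m
    if PySem.List.pyRepeat substr (factor : Int) == check then
      pvAInner l substr m rest (d.insert substr (d.getD substr 0 + 1))
    else d

-- outer 'for m in range(1, largo)' with the 'if m >= maximo + 1: break' after the key insertion
def pvAOuter (l : List Char) (largo maximo : Nat) :
    List Nat → PySem.Dict (List Char) Int → PySem.Dict (List Char) Int
  | [], d => d
  | m :: rest, d =>
    let substr := pvASuffix l m
    let d1 := d.insert substr 0
    if maximo + 1 ≤ m then d1
    else pvAOuter l largo maximo rest (pvAInner l substr m (List.range' m ((largo - 1) / m) m) d1)

def SubStr_repetida3 (cadena : String) : String × Int :=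
  let l := cadena.toList
  let largo := l.length
  let maximo := largo / 2 + 1
  let d := pvAOuter l largo maximo (List.range' 1 (largo - 1) 1) PySem.Dict.empty
  -- 'for sub in subcadenas: if subcadenas[sub] > Mas_repite: …' — keys are unique, so the
  -- looked-up value of each key is exactly the second component of its items entry
  let fin := d.items.foldl (fun st kv => if kv.2 > st.2 then (kv.1, kv.2) else st)
    ("Nada".toList, (1 : Int))
  (String.ofList fin.1, fin.2)

-- ===== PORT B =====
-- Same Nat convention; all slice bounds below are nonnegative (j*m ≤ largo-1 throughout), and
-- range(2, (largo-1)//m + 1) = List.range' 2 ((largo-1)/m - 1) 1, range(1, tope+1) = List.range' 1 tope 1.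

-- inner 'for j in range(2, (largo-1)//m + 1): if cadena[largo-j*m : largo-(j-1)*m] != sub: break; k = j'
def pvBInner (l sub : List Char) (largo m : Nat) : List Nat → Nat → Nat
  | [], k => k
  | j :: rest, k =>
    if PySem.List.slice l (some ((largo - j * m : Nat) : Int)) (some ((largo - (j - 1) * m : Nat) : Int)) != sub then
      k
    else pvBInner l sub largo m rest j

def pvBOuter (l : List Char) (largo : Nat) : List Nat → List Char × Int → List Char × Int
  | [], st => st
  | m :: rest, st =>
    let sub := PySem.List.slice l (some ((largo - m : Nat) : Int)) none
    let k := pvBInner l sub largo m (List.range' 2 ((largo - 1) / m - 1) 1) 1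
    pvBOuter l largo rest (if (k : Int) > st.2 then (sub, (k : Int)) else st)

def SubStr_repetida3_alt (cadena : String) : String × Int :=
  let l := cadena.toList
  let largo := l.length
  let maximo := largo / 2 + 1
  let tope := min (largo - 1) maximo
  let st := pvBOuter l largo (List.range' 1 tope 1) ("Nada".toList, (1 : Int))
  (String.ofList st.1, st.2)

-- ===== PRECONDITION & SPEC =====
def Spec_SubStr_repetida3 (cadena : String) (out : String × Int) : Prop := out = SubStr_repetida3_alt cadena
instance (cadena : String) (out : String × Int) : Decidable (Spec_SubStr_repetida3 cadena out) := by unfold Spec_SubStr_repetida3; infer_instance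

-- ===== CLAIM (what is proved, stated in full; the proofs are below) =====
def Claim_equal_SubStr_repetida3 : Prop := ∀ (cadena : String), Dom_SubStr_repetida3 cadena → Spec_SubStr_repetida3 cadena (SubStr_repetida3 cadena)

-- ===== LEMMAS AND PROOFS =====

-- proof-side abbreviations
def pvSub (l : List Char) (m : Nat) : List Char := l.drop (l.length - m)

def pvOk (l : List Char) (m j : Nat) : Prop :=
  l.drop (l.length - j * m) = (List.replicate j (pvSub l m)).flatten

def pvCntA (l substr : List Char) (m : Nat) : List Nat → Nat
  | [] => 0
  | n :: rest =>
    if PySem.List.pyRepeat substr ((n / m : Nat) : Int) == pvASuffix l n then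
      pvCntA l substr m rest + 1
    else 0

def pvCntB (l sub : List Char) (largo m : Nat) : List Nat → Nat
  | [] => 0
  | j :: rest =>
    if PySem.List.slice l (some ((largo - j * m : Nat) : Int)) (some ((largo - (j - 1) * m : Nat) : Int)) == sub then
      pvCntB l sub largo m rest + 1
    else 0

theorem pv_len_sub (l : List Char) (m : Nat) (h : m ≤ l.length) : (pvSub l m).length = m := by
  simp [pvSub]; omega

theorem pv_step (l : List Char) (m j : Nat) (hm : m ≤ l.length) (hj : (j + 1) * m ≤ l.length) :
    pvOk l m (j + 1) ↔ ((l.drop (l.length - (j + 1) * m)).take m = pvSub l m ∧ pvOk l m j) := by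
  have hs : (pvSub l m).length = m := pv_len_sub l m hm
  have hjm : (j + 1) * m = j * m + m := by ring
  have hdd : (l.drop (l.length - (j + 1) * m)).drop m = l.drop (l.length - j * m) := by
    rw [List.drop_drop]; congr 1; omega
  have hrep : (List.replicate (j + 1) (pvSub l m)).flatten
      = pvSub l m ++ (List.replicate j (pvSub l m)).flatten := by
    rw [List.replicate_succ, List.flatten_cons]
  constructor
  · intro h
    have h' : l.drop (l.length - (j + 1) * m)
        = pvSub l m ++ (List.replicate j (pvSub l m)).flatten := by
      rw [← hrep]; exact h
    refine ⟨?_, ?_⟩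
    · rw [h']; exact List.take_left' hs
    · unfold pvOk
      rw [← hdd, h']
      exact List.drop_left' hs
  · rintro ⟨h1, h2⟩
    unfold pvOk
    rw [hrep, ← h2, ← hdd, ← h1]
    exact (List.take_append_drop m _).symm

theorem pv_cntA_eq (l substr : List Char) (m : Nat) (ns : List Nat)
    (d : PySem.Dict (List Char) Int) :
    pvAInner l substr m ns d =
      (if pvCntA l substr m ns = 0 then d
       else d.insert substr (d.getD substr 0 + (pvCntA l substr m ns : Int))) := by
  induction ns generalizing d with
  | nil => simp [pvAInner, pvCntA]
  | cons n rest ih =>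
    rw [pvAInner, pvCntA]
    by_cases hc : (PySem.List.pyRepeat substr ((n / m : Nat) : Int) == pvASuffix l n) = true
    · rw [if_pos hc, if_pos hc, ih]
      by_cases h0 : pvCntA l substr m rest = 0
      · rw [if_pos h0, h0, if_neg (by omega : ¬((0:Nat) + 1 = 0))]
        norm_num
      · rw [if_neg h0, if_neg (by omega : ¬(pvCntA l substr m rest + 1 = 0)),
          PySem.Dict.getD_insert_self, PySem.Dict.insert_insert_self]
        congr 1
        push_cast
        ring
    · rw [if_neg hc, if_neg hc, if_pos rfl]

theorem pv_cntB_eq (l sub : List Char) (largo m : Nat) :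
    ∀ (c k : Nat), pvBInner l sub largo m (List.range' (k + 1) c 1) k =
      k + pvCntB l sub largo m (List.range' (k + 1) c 1) := by
  intro c
  induction c with
  | zero => intro k; simp [pvBInner, pvCntB, List.range']
  | succ c ih =>
    intro k
    rw [List.range'_succ, pvBInner, pvCntB]
    simp only [Nat.add_sub_cancel]
    by_cases hc : (PySem.List.slice l (some ((largo - (k + 1) * m : Nat) : Int))
        (some ((largo - k * m : Nat) : Int)) == sub) = true
    · rw [if_neg (by simp [bne, hc]), if_pos hc, ih (k + 1)]
      omega
    · rw [if_pos (by simp [bne, hc]), if_neg hc]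
      omega

theorem pv_core (l : List Char) (m : Nat) (hm1 : 1 ≤ m) (hmL : m + 1 ≤ l.length) :
    ∀ (c j : Nat), 1 ≤ j → j + c ≤ (l.length - 1) / m → pvOk l m j →
      pvCntA l (pvSub l m) m (List.range' ((j + 1) * m) c m) =
        pvCntB l (pvSub l m) l.length m (List.range' (j + 1) c 1) := by
  intro c
  induction c with
  | zero => intro j _ _ _; simp [pvCntA, pvCntB, List.range']
  | succ c ih =>
    intro j hj1 hjc hok
    have hT : (j + 1) * m ≤ l.length - 1 := by
      calc (j + 1) * m ≤ (l.length - 1) / m * m :=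
            Nat.mul_le_mul_right m (by omega)
        _ ≤ l.length - 1 := Nat.div_mul_le_self _ _
    have hL : (j + 1) * m ≤ l.length := by omega
    have hm0 : 0 < (j + 1) * m := by positivity
    have hstep := pv_step l m j (by omega) hL
    -- head of the A-side check equals `pvOk l m (j+1)`
    have hdivA : (j + 1) * m / m = j + 1 := Nat.mul_div_cancel _ (by omega)
    have hsufA : pvASuffix l ((j + 1) * m) = l.drop (l.length - (j + 1) * m) :=
      PySem.List.slice_from_neg_natCast l _ hm0
    have hchkA : (PySem.List.pyRepeat (pvSub l m) (((j + 1) * m / m : Nat) : Int)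
        == pvASuffix l ((j + 1) * m)) = true ↔ pvOk l m (j + 1) := by
      rw [hdivA, hsufA]
      simp only [PySem.List.pyRepeat, Int.toNat_natCast, beq_iff_eq, pvOk]
      exact eq_comm
    -- head of the B-side check equals `pvOk l m (j+1)` as well
    have hamount : l.length - ((j + 1) - 1) * m - (l.length - (j + 1) * m) = m := by
      have h1 : (j + 1) * m = j * m + m := by ring
      have h2 : ((j + 1) - 1) * m = j * m := by simp
      omega
    have hchkB : (PySem.List.slice l (some ((l.length - (j + 1) * m : Nat) : Int))
        (some ((l.length - ((j + 1) - 1) * m : Nat) : Int)) == pvSub l m) = true ↔ pvOk l m (j + 1) := by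
      rw [PySem.List.slice_natCast, hamount, beq_iff_eq, hstep]
      constructor
      · intro h; exact ⟨h, hok⟩
      · intro h; exact h.1
    have h12 : (j + 1) * m + m = (j + 2) * m := by ring
    have hcons : List.range' ((j + 1) * m) (c + 1) m
        = (j + 1) * m :: List.range' ((j + 2) * m) c m := by
      rw [List.range'_succ, h12]
    rw [hcons, List.range'_succ, pvCntA, pvCntB]
    by_cases hok1 : pvOk l m (j + 1)
    · rw [if_pos (hchkA.mpr hok1), if_pos (hchkB.mpr hok1)]
      rw [ih (j + 1) (by omega) (by omega) hok1]
    · rw [if_neg (fun h => hok1 (hchkA.mp h)), if_neg (fun h => hok1 (hchkB.mp h))]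

-- the items list A's dict holds after the outer loop, per outer-loop value list
def pvItems (l : List Char) (largo maximo : Nat) : List Nat → List (List Char × Int)
  | [] => []
  | m :: rest =>
    if maximo + 1 ≤ m then [(pvSub l m, 0)]
    else (pvSub l m,
      (pvCntA l (pvSub l m) m (List.range' m ((largo - 1) / m) m) : Int)) ::
        pvItems l largo maximo rest

theorem pv_cnt_loop (l : List Char) (m : Nat) (hm1 : 1 ≤ m) (hmL : m + 1 ≤ l.length) :
    pvCntA l (pvSub l m) m (List.range' m ((l.length - 1) / m) m)
      = 1 + pvCntB l (pvSub l m) l.length m (List.range' 2 ((l.length - 1) / m - 1) 1) := by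
  have hT1 : 1 ≤ (l.length - 1) / m := (Nat.one_le_div_iff (by omega)).2 (by omega)
  obtain ⟨t, ht⟩ : ∃ t, (l.length - 1) / m = t + 1 := ⟨(l.length - 1) / m - 1, by omega⟩
  rw [ht, Nat.add_sub_cancel, List.range'_succ, pvCntA]
  have hdiv : m / m = 1 := Nat.div_self (by omega)
  have hsuf : pvASuffix l m = pvSub l m :=
    PySem.List.slice_from_neg_natCast l m (by omega)
  have hchk : (PySem.List.pyRepeat (pvSub l m) ((m / m : Nat) : Int) == pvASuffix l m) = true := by
    rw [hdiv, hsuf]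
    simp [PySem.List.pyRepeat]
  rw [if_pos hchk]
  have hmm : m + m = (1 + 1) * m := by ring
  have hok1 : pvOk l m 1 := by simp [pvOk, pvSub]
  have key := pv_core l m hm1 hmL t 1 (le_refl 1) (by omega) hok1
  have h2 : (1 : Nat) + 1 = 2 := rfl
  rw [h2] at key
  rw [hmm, h2, key]
  omega

theorem pv_outer_items (l : List Char) (maximo : Nat) :
    ∀ (c a : Nat) (d : PySem.Dict (List Char) Int),
      1 ≤ a → a + c = l.length → (∀ k ∈ d.keys, k.length < a) →
      (pvAOuter l l.length maximo (List.range' a c 1) d).items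
        = d.items ++ pvItems l l.length maximo (List.range' a c 1) := by
  intro c
  induction c with
  | zero => intro a d _ _ _; simp [pvAOuter, pvItems]
  | succ c ih =>
    intro a d ha hac hkeys
    have haL : a ≤ l.length := by omega
    have hsuf : pvASuffix l a = pvSub l a :=
      PySem.List.slice_from_neg_natCast l a (by omega)
    have hlen : (pvSub l a).length = a := pv_len_sub l a haL
    have hfresh : d.contains (pvASuffix l a) = false := by
      rw [hsuf]
      cases hcon : d.contains (pvSub l a) with
      | false => rfl
      | true =>
        have := hkeys _ ((PySem.Dict.contains_iff_mem_keys d _).1 hcon)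
        omega
    rw [List.range'_succ, pvAOuter, pvItems, hsuf]
    by_cases hbig : maximo + 1 ≤ a
    · rw [if_pos hbig, if_pos hbig]
      exact PySem.Dict.items_insert_of_not_contains d 0 (hsuf ▸ hfresh)
    · rw [if_neg hbig, if_neg hbig]
      have hcnt : pvCntA l (pvSub l a) a (List.range' a ((l.length - 1) / a) a) ≠ 0 := by
        rw [pv_cnt_loop l a (by omega) (by omega)]
        omega
      rw [pv_cntA_eq, if_neg hcnt, PySem.Dict.getD_insert_self,
        PySem.Dict.insert_insert_self]
      rw [ih (a + 1) (d.insert (pvSub l a)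
          ((0 : Int) + (pvCntA l (pvSub l a) a (List.range' a ((l.length - 1) / a) a) : Int)))
        (by omega) (by omega) ?fresh]
      case fresh =>
        intro k hk
        rcases (PySem.Dict.mem_keys_insert d _ k _).1 hk with h | h
        · subst h; omega
        · have := hkeys _ h; omega
      rw [PySem.Dict.items_insert_of_not_contains d _ (hsuf ▸ hfresh)]
      simp

theorem pv_scan (l : List Char) (maximo : Nat) :
    ∀ (c a : Nat) (st : List Char × Int),
      1 ≤ a → a + c = l.length → 1 ≤ st.2 →
      (pvItems l l.length maximo (List.range' a c 1)).foldl
          (fun st kv => if kv.2 > st.2 then (kv.1, kv.2) else st) st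
        = pvBOuter l l.length (List.range' a (min (l.length - 1) maximo + 1 - a) 1) st := by
  intro c
  induction c with
  | zero =>
    intro a st ha hac hst
    have h0 : min (l.length - 1) maximo + 1 - a = 0 := by omega
    rw [h0]
    simp [pvItems, pvBOuter]
  | succ c ih =>
    intro a st ha hac hst
    rw [List.range'_succ, pvItems]
    by_cases hbig : maximo + 1 ≤ a
    · have h0 : min (l.length - 1) maximo + 1 - a = 0 := by omega
      rw [if_pos hbig, h0]
      simp only [List.range'_zero, pvBOuter, List.foldl_cons, List.foldl_nil]
      rw [if_neg (by omega)]
    · have h1 : 1 ≤ min (l.length - 1) maximo + 1 - a := by omega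
      have hsplit : min (l.length - 1) maximo + 1 - a
          = (min (l.length - 1) maximo + 1 - (a + 1)) + 1 := by omega
      rw [if_neg hbig, hsplit, List.range'_succ, pvBOuter]
      have hsuf : PySem.List.slice l (some ((l.length - a : Nat) : Int)) none = pvSub l a :=
        PySem.List.slice_from_natCast l _
      rw [hsuf]
      have hk : pvBInner l (pvSub l a) l.length a
            (List.range' 2 ((l.length - 1) / a - 1) 1) 1
          = pvCntA l (pvSub l a) a (List.range' a ((l.length - 1) / a) a) := by
        have := pv_cntB_eq l (pvSub l a) l.length a ((l.length - 1) / a - 1) 1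
        rw [this, pv_cnt_loop l a (by omega) (by omega)]
      rw [hk, List.foldl_cons]
      have hstep : (if (pvSub l a, (pvCntA l (pvSub l a) a (List.range' a ((l.length - 1) / a) a) : Int)).2 > st.2
             then ((pvSub l a, (pvCntA l (pvSub l a) a (List.range' a ((l.length - 1) / a) a) : Int)).1, (pvSub l a, (pvCntA l (pvSub l a) a (List.range' a ((l.length - 1) / a) a) : Int)).2) else st)
          = (if (pvCntA l (pvSub l a) a (List.range' a ((l.length - 1) / a) a) : Int) > st.2 then (pvSub l a, (pvCntA l (pvSub l a) a (List.range' a ((l.length - 1) / a) a) : Int)) else st) := rfl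
      rw [hstep]
      have hge : 1 ≤ pvCntA l (pvSub l a) a (List.range' a ((l.length - 1) / a) a) := by
        rw [pv_cnt_loop l a (by omega) (by omega)]; omega
      by_cases hgt : (pvCntA l (pvSub l a) a (List.range' a ((l.length - 1) / a) a) : Int) > st.2
      · rw [if_pos hgt]
        exact ih (a + 1) _ (by omega) (by omega) (by simpa using hge)
      · rw [if_neg hgt]
        exact ih (a + 1) _ (by omega) (by omega) hst

theorem pv_main (cadena : String) : SubStr_repetida3 cadena = SubStr_repetida3_alt cadena := by
  simp only [SubStr_repetida3, SubStr_repetida3_alt]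
  have hempty : (PySem.Dict.empty : PySem.Dict (List Char) Int).items = [] := rfl
  by_cases h : cadena.toList.length = 0
  · simp [h, pvAOuter, pvBOuter, hempty]
  · have hL : 1 ≤ cadena.toList.length := by omega
    have houter := pv_outer_items cadena.toList (cadena.toList.length / 2 + 1)
      (cadena.toList.length - 1) 1 PySem.Dict.empty (by omega) (by omega)
      (by simp [PySem.Dict.keys_empty])
    rw [houter]
    have hscan := pv_scan cadena.toList (cadena.toList.length / 2 + 1)
      (cadena.toList.length - 1) 1 ("Nada".toList, (1 : Int)) (by omega) (by omega)
      (by norm_num)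
    simp only [Nat.add_sub_cancel] at hscan
    simp only [hempty, List.nil_append]
    rw [hscan]

-- ===== VERDICT (by name: the statement is the Claim_ definition above) =====
theorem SubStr_repetida3_spec : Claim_equal_SubStr_repetida3 := by
  intro cadena _
  unfold Spec_SubStr_repetida3
  exact pv_main cadena
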